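-- pv_equiv track=rewrite | github.com/robtapia/T1-Discretas | respaldo.py | satisfacible
-- ===== SOURCE A (Python) =====
-- def SetLiteral(formula, lit):
--     if(formula==[]):
--         return formula
--     clausula=0
--     while(clausula<len(formula)):
--         if lit in formula[clausula]:
--             del formula[clausula]
--         elif -lit in formula[clausula]:
--             formula[clausula].remove(-lit)
--         else:
--             clausula=clausula+1
--     return formula
--
-- def satisfacible(formula,literal):
--         if(formulaVacia(formula)):
--                 return True
--         if(clausulaVacia(formula)):
--                 return False
--         else:
--                 literal=(formula[0][0])
--                 formula=SetLiteral(formula,literal)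
--                 return satisfacible(formula,literal)
--
-- def formulaVacia(formula):
--         if formula==[]:
--                 return True
--         else:
--                 return False
--
-- def clausulaVacia(formula):
--         for clausula in formula:
--                 if clausula==[]:
--                         return True
--                 else:
--                         continue
--         return False
-- ===== SOURCE B (Python) =====
-- def satisfacible(formula, literal):
--     # Iterative rewrite: while-loop over a freshly built formula each round
--     # (no in-place mutation of the argument, unlike the original).
--     while formula:
--         if [] in formula:
--             return False
--         lit = formula[0][0]
--         formula = [[x for x in c if x != -lit] for c in formula if lit not in c]
--     return True
-- ===== Notes on version B (the rewrite author's own statement) =====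
-- stated objective: simpler
-- what changed: Tail recursion replaced by a while-loop that rebuilds the formula with comprehensions (filter clauses containing the literal, filter -literal out of the rest) instead of SetLiteral's in-place del/remove index loop; B does not mutate the argument.
import Mathlib
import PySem

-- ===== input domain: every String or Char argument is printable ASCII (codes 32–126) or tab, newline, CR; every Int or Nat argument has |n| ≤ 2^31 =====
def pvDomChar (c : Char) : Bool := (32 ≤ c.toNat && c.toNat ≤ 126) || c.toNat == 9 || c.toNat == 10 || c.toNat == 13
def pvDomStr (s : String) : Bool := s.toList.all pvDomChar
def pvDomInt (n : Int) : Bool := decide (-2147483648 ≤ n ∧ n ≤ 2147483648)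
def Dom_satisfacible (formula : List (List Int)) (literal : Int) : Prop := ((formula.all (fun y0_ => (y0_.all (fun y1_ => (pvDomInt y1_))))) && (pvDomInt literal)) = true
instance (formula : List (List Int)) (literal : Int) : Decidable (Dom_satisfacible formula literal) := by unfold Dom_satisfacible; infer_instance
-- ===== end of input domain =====

-- B replaces A's tail recursion + in-place SetLiteral by a while loop rebuilding the
-- formula with comprehensions (objective: simpler). A mutates its argument in place,
-- B does not; the equivalence proved here is about the return value only.
-- Both ports carry a structural Nat fuel as a totality guard only: each loop round
-- strictly shrinks its measure, so the 0-fuel arms are never reached from the wrappers.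

-- ===== PORT A =====
-- SetLiteral's while loop: 'del formula[clausula]' advances over a shorter list,
-- 'formula[clausula].remove(-lit)' re-examines the same (shortened) clause, 'else' advances.
-- Fuel bounds the iteration count by len(formula) + total number of literals.
def setLiteralGo : Nat → List (List Int) → Int → List (List Int)
  | _, [], _ => []
  | 0, f, _ => f  -- never reached: fuel covers every loop iteration
  | fuel + 1, c :: rest, lit =>
    if lit ∈ c then setLiteralGo fuel rest lit
    else if -lit ∈ c then setLiteralGo fuel ((c.erase (-lit)) :: rest) lit
    else c :: setLiteralGo fuel rest lit

def setLiteral (formula : List (List Int)) (lit : Int) : List (List Int) :=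
  setLiteralGo (formula.length + (formula.map List.length).sum) formula lit

-- satisfacible's tail recursion; fuel bounds the depth by len(formula)
-- (each round deletes at least the first clause).
def satisfacibleGo (fuel : Nat) (formula : List (List Int)) (literal : Int) : Bool :=
  if formula = [] then true
  else if formula.any (fun c => c = []) then false
  else
    match fuel with
    | 0 => false  -- never reached: fuel covers every recursion step
    | fuel' + 1 =>
      let lit := (formula.headD []).headD 0
      satisfacibleGo fuel' (setLiteral formula lit) lit

def satisfacible (formula : List (List Int)) (literal : Int) : Bool :=
  satisfacibleGo formula.length formula literal

-- ===== PORT B =====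
-- one round of the while loop's body: the two comprehensions
def altStep (lit : Int) (formula : List (List Int)) : List (List Int) :=
  (formula.filter (fun c => decide (lit ∉ c))).map (fun c => c.filter (fun x => decide (x ≠ -lit)))

-- the while loop; fuel bounds the round count by len(formula)
def altGo (fuel : Nat) (formula : List (List Int)) (literal : Int) : Bool :=
  match formula with
  | [] => true
  | c0 :: rest =>
    if [] ∈ (c0 :: rest) then false
    else
      match fuel with
      | 0 => false  -- never reached: fuel covers every round
      | fuel' + 1 => altGo fuel' (altStep (c0.headD 0) (c0 :: rest)) (c0.headD 0)

def satisfacible_alt (formula : List (List Int)) (literal : Int) : Bool :=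
  altGo formula.length formula literal

-- ===== PRECONDITION & SPEC =====
def Spec_satisfacible (formula : List (List Int)) (literal : Int) (out : Bool) : Prop := out = satisfacible_alt formula literal
instance (formula : List (List Int)) (literal : Int) (out : Bool) : Decidable (Spec_satisfacible formula literal out) := by unfold Spec_satisfacible; infer_instance

-- ===== CLAIM (what is proved, stated in full; the proofs are below) =====
def Claim_equal_satisfacible : Prop := ∀ (formula : List (List Int)) (literal : Int), Dom_satisfacible formula literal → Spec_satisfacible formula literal (satisfacible formula literal)

-- ===== LEMMAS AND PROOFS =====

lemma filter_erase_of_not_pred {p : Int → Bool} {a : Int} (c : List Int) (ha : p a = false) :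
    (c.erase a).filter p = c.filter p := by
  induction c with
  | nil => rfl
  | cons x xs ih =>
    by_cases hx : x = a
    · subst hx; simp [List.erase_cons_head, ha]
    · rw [List.erase_cons_tail (by simpa using hx)]
      simp [List.filter_cons, ih]

lemma setLiteralGo_eq_altStep (fuel : Nat) : ∀ (f : List (List Int)) (lit : Int),
    f.length + (f.map List.length).sum ≤ fuel → setLiteralGo fuel f lit = altStep lit f := by
  induction fuel with
  | zero =>
    intro f lit h
    cases f with
    | nil => rfl
    | cons c rest => simp at h
  | succ fuel ih =>
    intro f lit h
    cases f with
    | nil => rfl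
    | cons c rest =>
      simp only [List.length_cons, List.map_cons, List.sum_cons] at h
      by_cases h1 : lit ∈ c
      · rw [setLiteralGo, if_pos h1, ih rest lit (by omega)]
        simp only [altStep, List.filter_cons]
        rw [if_neg (by simpa using h1)]
      · by_cases h2 : -lit ∈ c
        · have hlen : 0 < c.length := List.length_pos_of_mem h2
          rw [setLiteralGo, if_neg h1, if_pos h2,
            ih ((c.erase (-lit)) :: rest) lit (by
              simp only [List.length_cons, List.map_cons, List.sum_cons,
                List.length_erase_of_mem h2]
              omega)]
          have hl : lit ∉ c.erase (-lit) := fun hm => h1 (List.mem_of_mem_erase hm)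
          simp only [altStep, List.filter_cons]
          rw [if_pos (by simpa using hl), if_pos (by simpa using h1)]
          simp only [List.map_cons]
          congr 1
          exact filter_erase_of_not_pred c (by simp)
        · rw [setLiteralGo, if_neg h1, if_neg h2, ih rest lit (by omega)]
          simp only [altStep, List.filter_cons]
          rw [if_pos (by simpa using h1)]
          simp only [List.map_cons]
          congr 1
          exact ((List.filter_eq_self).2 (fun x hx => by
            simp only [decide_eq_true_eq]
            exact fun he => h2 (he ▸ hx))).symm

lemma setLiteral_eq_altStep (f : List (List Int)) (lit : Int) :
    setLiteral f lit = altStep lit f :=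
  setLiteralGo_eq_altStep _ f lit (Nat.le_refl _)

lemma altStep_length_lt (c : List Int) (rest : List (List Int)) (hc : c ≠ []) :
    (altStep (c.headD 0) (c :: rest)).length < (c :: rest).length := by
  have hmem : (c.head?.getD 0) ∈ c := by
    cases c with
    | nil => exact absurd rfl hc
    | cons x xs => simp
  have := List.length_filter_le (fun c' => decide ((c.headD 0) ∉ c')) rest
  simp only [altStep, List.filter_cons, List.length_map, List.length_cons,
    List.headD_eq_head?_getD]
  rw [if_neg (by simp [hmem])]
  simp only [List.headD_eq_head?_getD] at this
  omega

lemma satGo_eq_altGo (fuel : Nat) : ∀ (f : List (List Int)) (l : Int),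
    f.length ≤ fuel → satisfacibleGo fuel f l = altGo fuel f l := by
  induction fuel with
  | zero =>
    intro f l h
    have : f = [] := List.eq_nil_of_length_eq_zero (Nat.le_zero.1 h)
    subst this
    rfl
  | succ fuel ih =>
    intro f l h
    cases f with
    | nil => rfl
    | cons c rest =>
      by_cases he : (c :: rest).any (fun c' => c' = [])
      · rw [satisfacibleGo, if_neg (by simp), if_pos he, altGo]
        rw [if_pos (by
          rcases List.any_eq_true.1 he with ⟨c', hc', h'⟩
          simp only [decide_eq_true_eq] at h'
          exact h' ▸ hc')]
      · have hc : c ≠ [] := fun h0 => he (by simp [h0])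
        rw [satisfacibleGo, if_neg (by simp), if_neg he, altGo]
        rw [if_neg (fun hmem => he (List.any_eq_true.2 ⟨[], hmem, by simp⟩))]
        show satisfacibleGo fuel (setLiteral (c :: rest) (c.headD 0)) (c.headD 0) =
          altGo fuel (altStep (c.headD 0) (c :: rest)) (c.headD 0)
        rw [setLiteral_eq_altStep]
        exact ih _ _ (by
          have := altStep_length_lt c rest hc
          simp only [List.length_cons] at this h ⊢
          omega)

lemma satisfacible_eq_alt (formula : List (List Int)) (literal : Int) :
    satisfacible formula literal = satisfacible_alt formula literal :=
  satGo_eq_altGo formula.length formula literal (Nat.le_refl _)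

-- ===== VERDICT (by name: the statement is the Claim_ definition above) =====
theorem satisfacible_spec : Claim_equal_satisfacible :=
  fun formula literal _ => satisfacible_eq_alt formula literal
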